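-- pv_equiv track=rewrite | github.com/isayeu/eurika_2.0 | eurika/checks/self_guard.py | _compute_trends_from_history
-- ===== SOURCE A (Python) =====
-- def _compute_trends_from_history(data: dict, window: int = 5) -> dict[str, str]:
--     """Derive trends from history array (same logic as ArchitectureHistory.trend)."""
--
--     def _dir(values: list[int]) -> str:
--         if len(values) < 2:
--             return "stable"
--         if values[-1] > values[0]:
--             return "increasing"
--         if values[-1] < values[0]:
--             return "decreasing"
--         return "stable"
--
--     history = data.get("history") or []
--     pts = history[-window:] if len(history) >= window else history
--     if len(pts) < 2:
--         return {"complexity": "insufficient_data", "smells": "insufficient_data", "centralization": "insufficient_data"}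
--     complexity_series = [p.get("modules", 0) + p.get("dependencies", 0) for p in pts]
--     smells_series = [p.get("total_smells", 0) for p in pts]
--     central_series = [p.get("max_degree", 0) for p in pts]
--     return {
--         "complexity": _dir(complexity_series),
--         "smells": _dir(smells_series),
--         "centralization": _dir(central_series),
--     }
-- ===== SOURCE B (Python) =====
-- def _compute_trends_from_history(data: dict, window: int = 5) -> dict[str, str]:
--     """Same trends, but comparing only the two endpoints: no per-metric series lists."""
--
--     def _cmp2(a: int, b: int) -> str:
--         return "increasing" if b > a else ("decreasing" if b < a else "stable")
--
--     history = data.get("history") or []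
--     pts = history[-window:] if len(history) >= window else history
--     if len(pts) < 2:
--         return {"complexity": "insufficient_data", "smells": "insufficient_data", "centralization": "insufficient_data"}
--     first, last = pts[0], pts[-1]
--     return {
--         "complexity": _cmp2(first.get("modules", 0) + first.get("dependencies", 0),
--                             last.get("modules", 0) + last.get("dependencies", 0)),
--         "smells": _cmp2(first.get("total_smells", 0), last.get("total_smells", 0)),
--         "centralization": _cmp2(first.get("max_degree", 0), last.get("max_degree", 0)),
--     }
-- ===== Notes on version B (the rewrite author's own statement) =====
-- stated objective: simpler
-- what changed: B drops the three intermediate per-metric series lists: it binds the first and last point of pts once and applies a two-argument comparator to each metric's endpoint values, instead of building a list per metric and re-deriving its endpoints inside _dir.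
import Mathlib
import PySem

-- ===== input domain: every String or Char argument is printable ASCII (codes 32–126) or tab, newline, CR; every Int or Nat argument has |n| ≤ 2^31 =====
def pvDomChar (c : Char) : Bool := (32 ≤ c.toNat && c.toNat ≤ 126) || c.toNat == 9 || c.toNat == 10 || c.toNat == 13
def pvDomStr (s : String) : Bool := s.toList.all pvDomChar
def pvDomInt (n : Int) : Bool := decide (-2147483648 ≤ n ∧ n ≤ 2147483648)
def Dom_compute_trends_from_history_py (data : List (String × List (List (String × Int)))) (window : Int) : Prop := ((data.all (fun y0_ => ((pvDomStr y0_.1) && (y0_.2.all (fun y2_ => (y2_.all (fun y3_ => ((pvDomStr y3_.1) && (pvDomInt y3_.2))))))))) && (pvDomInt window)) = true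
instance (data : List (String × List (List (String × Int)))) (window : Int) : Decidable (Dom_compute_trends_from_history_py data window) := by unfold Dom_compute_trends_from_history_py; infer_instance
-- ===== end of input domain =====

-- B binds the first/last point once and compares endpoints per metric, avoiding the three intermediate series lists (simpler; return value only).
-- ===== PORT A =====
-- _dir: compares first and last of the series (guard len < 2, then values[-1] vs values[0])
def pvDirA (values : List Int) : String :=
  if values.length < 2 then "stable"
  else
    match PySem.List.pyGet? values (-1), PySem.List.pyGet? values 0 with
    | some last, some first =>
        if last > first then "increasing"
        else if last < first then "decreasing"
        else "stable"
    | _, _ => "stable"  -- unreachable: length ≥ 2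

def compute_trends_from_history_py (data : List (String × List (List (String × Int)))) (window : Int) : List (String × String) :=
  let history := (PySem.Dict.get? (PySem.Dict.mk data) "history").getD []
  let pts := if (history.length : Int) ≥ window then PySem.List.slice history (some (-window)) none else history
  if pts.length < 2 then
    [("complexity", "insufficient_data"), ("smells", "insufficient_data"), ("centralization", "insufficient_data")]
  else
    let complexity_series := pts.map (fun p => PySem.Dict.getD (PySem.Dict.mk p) "modules" 0 + PySem.Dict.getD (PySem.Dict.mk p) "dependencies" 0)
    let smells_series := pts.map (fun p => PySem.Dict.getD (PySem.Dict.mk p) "total_smells" 0)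
    let central_series := pts.map (fun p => PySem.Dict.getD (PySem.Dict.mk p) "max_degree" 0)
    [("complexity", pvDirA complexity_series),
     ("smells", pvDirA smells_series),
     ("centralization", pvDirA central_series)]

-- ===== PORT B =====
-- B: no series lists; compare the two endpoint points directly per metric.
def pvCmp2 (a b : Int) : String :=
  if b > a then "increasing" else if b < a then "decreasing" else "stable"

def compute_trends_from_history_py_alt (data : List (String × List (List (String × Int)))) (window : Int) : List (String × String) :=
  let history := (PySem.Dict.get? (PySem.Dict.mk data) "history").getD []
  let pts := if (history.length : Int) ≥ window then PySem.List.slice history (some (-window)) none else history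
  if pts.length < 2 then
    [("complexity", "insufficient_data"), ("smells", "insufficient_data"), ("centralization", "insufficient_data")]
  else
    match PySem.List.pyGet? pts 0, PySem.List.pyGet? pts (-1) with
    | some first, some last =>
        [("complexity", pvCmp2 (PySem.Dict.getD (PySem.Dict.mk first) "modules" 0 + PySem.Dict.getD (PySem.Dict.mk first) "dependencies" 0)
                               (PySem.Dict.getD (PySem.Dict.mk last) "modules" 0 + PySem.Dict.getD (PySem.Dict.mk last) "dependencies" 0)),
         ("smells", pvCmp2 (PySem.Dict.getD (PySem.Dict.mk first) "total_smells" 0) (PySem.Dict.getD (PySem.Dict.mk last) "total_smells" 0)),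
         ("centralization", pvCmp2 (PySem.Dict.getD (PySem.Dict.mk first) "max_degree" 0) (PySem.Dict.getD (PySem.Dict.mk last) "max_degree" 0))]
    | _, _ => []  -- unreachable: length ≥ 2

-- ===== PRECONDITION & SPEC =====
def Spec_compute_trends_from_history_py (data : List (String × List (List (String × Int)))) (window : Int) (out : List (String × String)) : Prop := out = compute_trends_from_history_py_alt data window
instance (data : List (String × List (List (String × Int)))) (window : Int) (out : List (String × String)) : Decidable (Spec_compute_trends_from_history_py data window out) := by unfold Spec_compute_trends_from_history_py; infer_instance

-- ===== CLAIM (what is proved, stated in full; the proofs are below) =====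
def Claim_equal_compute_trends_from_history_py : Prop := ∀ (data : List (String × List (List (String × Int)))) (window : Int), Dom_compute_trends_from_history_py data window → Spec_compute_trends_from_history_py data window (compute_trends_from_history_py data window)

-- ===== LEMMAS AND PROOFS =====

-- On a list of length ≥ 2, A's _dir applied to the mapped series agrees with B's
-- endpoint comparison of the unmapped list.
theorem pvDirA_map_eq (pts : List (List (String × Int))) (f : List (String × Int) → Int)
    (a b : List (String × Int)) (h : 2 ≤ pts.length)
    (h0 : PySem.List.pyGet? pts 0 = some a) (h1 : PySem.List.pyGet? pts (-1) = some b) :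
    pvDirA (pts.map f) = pvCmp2 (f a) (f b) := by
  have hlen : (pts.map f).length = pts.length := List.length_map ..
  have hz : PySem.List.pyGet? (pts.map f) 0 = some (f a) := by
    rw [PySem.List.pyGet?_zero] at h0 ⊢
    simp [h0]
  have hn : PySem.List.pyGet? (pts.map f) (-1) = some (f b) := by
    rw [PySem.List.pyGet?_neg_one] at h1 ⊢
    simp [List.getLast?_map, h1]
  unfold pvDirA pvCmp2
  rw [hz, hn, hlen]
  simp [Nat.not_lt.mpr h]

-- The whole body of both functions, generalized over the common pts list.
theorem pv_main (pts : List (List (String × Int))) :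
    (if pts.length < 2 then
      [("complexity", "insufficient_data"), ("smells", "insufficient_data"), ("centralization", "insufficient_data")]
    else
      [("complexity", pvDirA (pts.map (fun p => PySem.Dict.getD (PySem.Dict.mk p) "modules" 0 + PySem.Dict.getD (PySem.Dict.mk p) "dependencies" 0))),
       ("smells", pvDirA (pts.map (fun p => PySem.Dict.getD (PySem.Dict.mk p) "total_smells" 0))),
       ("centralization", pvDirA (pts.map (fun p => PySem.Dict.getD (PySem.Dict.mk p) "max_degree" 0)))]) =
    (if pts.length < 2 then
      [("complexity", "insufficient_data"), ("smells", "insufficient_data"), ("centralization", "insufficient_data")]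
    else
      match PySem.List.pyGet? pts 0, PySem.List.pyGet? pts (-1) with
      | some first, some last =>
          [("complexity", pvCmp2 (PySem.Dict.getD (PySem.Dict.mk first) "modules" 0 + PySem.Dict.getD (PySem.Dict.mk first) "dependencies" 0)
                                 (PySem.Dict.getD (PySem.Dict.mk last) "modules" 0 + PySem.Dict.getD (PySem.Dict.mk last) "dependencies" 0)),
           ("smells", pvCmp2 (PySem.Dict.getD (PySem.Dict.mk first) "total_smells" 0) (PySem.Dict.getD (PySem.Dict.mk last) "total_smells" 0)),
           ("centralization", pvCmp2 (PySem.Dict.getD (PySem.Dict.mk first) "max_degree" 0) (PySem.Dict.getD (PySem.Dict.mk last) "max_degree" 0))]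
      | _, _ => []) := by
  by_cases hlen : pts.length < 2
  · rw [if_pos hlen, if_pos hlen]
  · have h2 : 2 ≤ pts.length := Nat.not_lt.mp hlen
    have hne : pts ≠ [] := by cases pts with
      | nil => simp at h2
      | cons x xs => simp
    obtain ⟨a, ha⟩ : ∃ a, PySem.List.pyGet? pts 0 = some a := by
      rw [PySem.List.pyGet?_zero]
      cases pts with
      | nil => simp at h2
      | cons x xs => exact ⟨x, rfl⟩
    obtain ⟨b, hb⟩ : ∃ b, PySem.List.pyGet? pts (-1) = some b := by
      rw [PySem.List.pyGet?_neg_one]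
      exact ⟨pts.getLast hne, List.getLast?_eq_some_getLast hne⟩
    rw [if_neg hlen, if_neg hlen, ha, hb,
        pvDirA_map_eq pts _ a b h2 ha hb,
        pvDirA_map_eq pts _ a b h2 ha hb,
        pvDirA_map_eq pts _ a b h2 ha hb]

-- ===== VERDICT (by name: the statement is the Claim_ definition above) =====
theorem compute_trends_from_history_py_spec : Claim_equal_compute_trends_from_history_py := by
  intro data window _
  show compute_trends_from_history_py data window = compute_trends_from_history_py_alt data window
  exact pv_main _
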